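-- pv_equiv track=rewrite | github.com/yanghailin007-dotcom/xsdm | src/managers/StagePlanUtils.py | build_event_chains
-- ===== SOURCE A (Python) =====
-- from typing import Dict, List, Tuple
--
-- def build_event_chains(events: List) -> List:
--     """构建事件链条，确保逻辑连贯"""
--     if not events:
--         return []
--     chains = []
--     current_chain = []
--     for event in sorted(events, key=lambda x: x.get('start_chapter', 0)):
--         if not current_chain:
--             current_chain.append(event)
--         else:
--             last_event = current_chain[-1]
--             # 检查事件是否连贯
--             last_event_end = last_event.get('end_chapter', last_event.get('start_chapter', 0))
--             current_event_start = event.get('start_chapter', 0)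
--             if current_event_start - last_event_end <= 5:
--                 current_chain.append(event)
--             else:
--                 chains.append(current_chain)
--                 current_chain = [event]
--     if current_chain:
--         chains.append(current_chain)
--     return chains
-- ===== SOURCE B (Python) =====
-- def build_event_chains(events):
--     """Build event chains back-to-front: walk the sorted events in reverse and
--     prepend each event either into the chain it connects to or as a new chain."""
--     chains = []
--     for ev in reversed(sorted(events, key=lambda x: x.get('start_chapter', 0))):
--         if chains and chains[0][0].get('start_chapter', 0) - ev.get('end_chapter', ev.get('start_chapter', 0)) <= 5:
--             chains[0].insert(0, ev)
--         else:
--             chains.insert(0, [ev])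
--     return chains
-- ===== Notes on version B (the rewrite author's own statement) =====
-- stated objective: alternative
-- what changed: B builds the chain list back-to-front with a single reversed pass that prepends each event into the following chain or opens a new one, instead of A's forward accumulator of (finished chains, current chain) with a final flush.
import Mathlib
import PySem

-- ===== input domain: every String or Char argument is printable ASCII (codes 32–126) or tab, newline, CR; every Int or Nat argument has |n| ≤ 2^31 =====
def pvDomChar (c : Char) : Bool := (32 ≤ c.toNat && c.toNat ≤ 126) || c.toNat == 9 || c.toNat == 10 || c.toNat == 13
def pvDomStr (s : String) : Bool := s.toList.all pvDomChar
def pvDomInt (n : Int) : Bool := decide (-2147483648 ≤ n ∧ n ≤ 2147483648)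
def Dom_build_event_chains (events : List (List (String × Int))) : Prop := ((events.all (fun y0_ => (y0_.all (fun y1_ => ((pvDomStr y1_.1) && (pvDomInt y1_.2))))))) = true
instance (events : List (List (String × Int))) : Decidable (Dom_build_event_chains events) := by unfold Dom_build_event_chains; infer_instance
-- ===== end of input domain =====

-- B builds the chain list back-to-front (reversed pass, prepending) instead of A's
-- forward accumulator with a final flush; objective: alternative decomposition, same cost.

-- shared helper: event.get(key, default) on the association-list encoding (first match)
def pvGetD (e : List (String × Int)) (k : String) (d : Int) : Int :=
  ((e.find? (fun p => p.1 == k)).map Prod.snd).getD d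

-- ===== PORT A =====
def aStep (st : List (List (List (String × Int))) × List (List (String × Int)))
    (event : List (String × Int)) :
    List (List (List (String × Int))) × List (List (String × Int)) :=
  let chains := st.1
  let current_chain := st.2
  if current_chain.isEmpty then
    (chains, current_chain ++ [event])
  else
    let last_event := (PySem.List.pyGet? current_chain (-1)).getD []
    let last_event_end := pvGetD last_event "end_chapter" (pvGetD last_event "start_chapter" 0)
    let current_event_start := pvGetD event "start_chapter" 0
    if current_event_start - last_event_end ≤ 5 then
      (chains, current_chain ++ [event])
    else
      (chains ++ [current_chain], [event])

def build_event_chains (events : List (List (String × Int))) : List (List (List (String × Int))) :=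
  if events.isEmpty then []
  else
    let st := (PySem.List.sorted events (fun x => pvGetD x "start_chapter" 0) false).foldl aStep ([], [])
    if st.2.isEmpty then st.1 else st.1 ++ [st.2]

-- ===== PORT B =====
def bStep (ev : List (String × Int)) (chains : List (List (List (String × Int)))) :
    List (List (List (String × Int))) :=
  match chains with
  | (h :: t) :: rest =>
      if pvGetD h "start_chapter" 0 - pvGetD ev "end_chapter" (pvGetD ev "start_chapter" 0) ≤ 5 then
        (ev :: h :: t) :: rest
      else
        [ev] :: (h :: t) :: rest
  | [] :: rest => [ev] :: [] :: rest  -- unreachable: chains never contain an empty chain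
  | [] => [[ev]]

def build_event_chains_alt (events : List (List (String × Int))) : List (List (List (String × Int))) :=
  (PySem.List.sorted events (fun x => pvGetD x "start_chapter" 0) false).foldr bStep []

-- ===== PRECONDITION & SPEC =====
def Spec_build_event_chains (events : List (List (String × Int))) (out : List (List (List (String × Int)))) : Prop := out = build_event_chains_alt events
instance (events : List (List (String × Int))) (out : List (List (List (String × Int)))) : Decidable (Spec_build_event_chains events out) := by unfold Spec_build_event_chains; infer_instance

-- ===== CLAIM (what is proved, stated in full; the proofs are below) =====
def Claim_equal_build_event_chains : Prop := ∀ (events : List (List (String × Int))), Dom_build_event_chains events → Spec_build_event_chains events (build_event_chains events)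

-- ===== LEMMAS AND PROOFS =====

-- merge a pending (nonempty) chain `cur` into the already-built suffix of chains
def mergeRun (cur : List (List (String × Int))) (cs : List (List (List (String × Int)))) :
    List (List (List (String × Int))) :=
  match cs with
  | (h :: t) :: rest =>
      let lastE := (PySem.List.pyGet? cur (-1)).getD []
      if pvGetD h "start_chapter" 0 - pvGetD lastE "end_chapter" (pvGetD lastE "start_chapter" 0) ≤ 5 then
        (cur ++ h :: t) :: rest
      else
        cur :: (h :: t) :: rest
  | [] :: rest => cur :: [] :: rest
  | [] => [cur]

lemma pyGet_singleton (x : List (String × Int)) :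
    (PySem.List.pyGet? [x] (-1)).getD [] = x := by
  simp [PySem.List.pyGet?_neg_one]

lemma mergeRun_single (x : List (String × Int)) (cs : List (List (List (String × Int)))) :
    mergeRun [x] cs = bStep x cs := by
  match cs with
  | (h :: t) :: rest => simp [mergeRun, bStep, pyGet_singleton]
  | [] :: rest => rfl
  | [] => rfl

lemma merge_bStep_cont (cur : List (List (String × Int))) (e : List (String × Int))
    (cs : List (List (List (String × Int))))
    (hc : pvGetD e "start_chapter" 0 -
          pvGetD ((PySem.List.pyGet? cur (-1)).getD []) "end_chapter"
            (pvGetD ((PySem.List.pyGet? cur (-1)).getD []) "start_chapter" 0) ≤ 5) :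
    mergeRun cur (bStep e cs) = mergeRun (cur ++ [e]) cs := by
  match cs with
  | (h :: t) :: rest =>
      by_cases hr : pvGetD h "start_chapter" 0 - pvGetD e "end_chapter" (pvGetD e "start_chapter" 0) ≤ 5
      · simp [mergeRun, bStep, hr, hc]
      · simp [mergeRun, bStep, hr, hc]
  | [] :: rest => simp [mergeRun, bStep, hc]
  | [] => simp [mergeRun, bStep, hc]

lemma merge_bStep_break (cur : List (List (String × Int))) (e : List (String × Int))
    (cs : List (List (List (String × Int))))
    (hc : ¬ (pvGetD e "start_chapter" 0 -
          pvGetD ((PySem.List.pyGet? cur (-1)).getD []) "end_chapter"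
            (pvGetD ((PySem.List.pyGet? cur (-1)).getD []) "start_chapter" 0) ≤ 5)) :
    mergeRun cur (bStep e cs) = cur :: mergeRun [e] cs := by
  match cs with
  | (h :: t) :: rest =>
      by_cases hr : pvGetD h "start_chapter" 0 - pvGetD e "end_chapter" (pvGetD e "start_chapter" 0) ≤ 5 <;>
        simp [mergeRun, bStep, pyGet_singleton, hr, hc]
  | [] :: rest => simp [mergeRun, bStep, hc]
  | [] => simp [mergeRun, bStep, hc]

lemma isEmpty_false_of_ne {α : Type} (l : List α) (h : l ≠ []) : l.isEmpty = false := by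
  cases l with
  | nil => exact absurd rfl h
  | cons a t => rfl

lemma aStep_ne (chains : List (List (List (String × Int)))) (cur : List (List (String × Int)))
    (e : List (String × Int)) (h : cur ≠ []) :
    aStep (chains, cur) e =
      if pvGetD e "start_chapter" 0 -
          pvGetD ((PySem.List.pyGet? cur (-1)).getD []) "end_chapter"
            (pvGetD ((PySem.List.pyGet? cur (-1)).getD []) "start_chapter" 0) ≤ 5 then
        (chains, cur ++ [e])
      else (chains ++ [cur], [e]) := by
  simp [aStep, isEmpty_false_of_ne _ h]

lemma foldA_ne (es : List (List (String × Int)))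
    (chains : List (List (List (String × Int)))) (cur : List (List (String × Int)))
    (h : cur ≠ []) : (es.foldl aStep (chains, cur)).2 ≠ [] := by
  induction es generalizing chains cur with
  | nil => simpa using h
  | cons e es ih =>
      rw [List.foldl_cons, aStep_ne chains cur e h]
      split
      · exact ih chains (cur ++ [e]) (by simp)
      · exact ih (chains ++ [cur]) [e] (by simp)

lemma foldA_eq (es : List (List (String × Int)))
    (chains : List (List (List (String × Int)))) (cur : List (List (String × Int)))
    (h : cur ≠ []) :
    (es.foldl aStep (chains, cur)).1 ++ [(es.foldl aStep (chains, cur)).2] =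
      chains ++ mergeRun cur (es.foldr bStep []) := by
  induction es generalizing chains cur with
  | nil => simp [mergeRun]
  | cons e es ih =>
      rw [List.foldl_cons, List.foldr_cons, aStep_ne chains cur e h]
      by_cases hc : pvGetD e "start_chapter" 0 -
          pvGetD ((PySem.List.pyGet? cur (-1)).getD []) "end_chapter"
            (pvGetD ((PySem.List.pyGet? cur (-1)).getD []) "start_chapter" 0) ≤ 5
      · rw [if_pos hc, ih chains (cur ++ [e]) (by simp), merge_bStep_cont cur e _ hc]
      · rw [if_neg hc, ih (chains ++ [cur]) [e] (by simp), merge_bStep_break cur e _ hc]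
        simp

-- ===== VERDICT (by name: the statement is the Claim_ definition above) =====
theorem build_event_chains_spec : Claim_equal_build_event_chains := by
  intro events _
  unfold Spec_build_event_chains build_event_chains build_event_chains_alt
  by_cases he : events = []
  · subst he; rfl
  · have hs : PySem.List.sorted events (fun x => pvGetD x "start_chapter" 0) false ≠ [] := by
      simpa [PySem.List.sorted_eq_nil_iff] using he
    rw [if_neg (by simp [isEmpty_false_of_ne _ he])]
    match hss : PySem.List.sorted events (fun x => pvGetD x "start_chapter" 0) false with
    | [] => exact absurd hss hs
    | x :: xs =>
        have hne := foldA_ne xs ([] : List (List (List (String × Int)))) [x] (by simp)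
        have heq := foldA_eq xs ([] : List (List (List (String × Int)))) [x] (by simp)
        rw [List.foldl_cons, List.foldr_cons, show aStep ([], []) x = ([], [x]) from rfl]
        rw [if_neg (by simp [isEmpty_false_of_ne _ hne])]
        rw [heq, mergeRun_single]
        simp
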